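-- pv_equiv track=rewrite | github.com/dieagus/rideshare_optimization | optimizer.py | simple_greedy
-- ===== SOURCE A (Python) =====
-- def simple_greedy(base_demands):
--     """
--     Simple greedy algorithm for baseline comparison
--     Sets prices based on demand level without considering spillover
--     """
--     prices = []
--     for demand in base_demands:
--         # Simple heuristic: higher price for higher demand
--         if demand > 70:
--             prices.append(20)
--         elif demand > 50:
--             prices.append(15)
--         elif demand > 30:
--             prices.append(12)
--         else:
--             prices.append(8)
--     return prices
-- ===== SOURCE B (Python) =====
-- _SURCHARGES = ((30, 4), (50, 3), (70, 5))
--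
-- def simple_greedy(base_demands):
--     # price = base 8 plus the surcharge of every threshold the demand exceeds
--     return [8 + sum(inc for t, inc in _SURCHARGES if d > t) for d in base_demands]
-- ===== Notes on version B (the rewrite author's own statement) =====
-- stated objective: alternative
-- what changed: Replaced the if/elif chain selecting one of four constant prices with an additive model: a base price of 8 plus a fold summing the surcharge of every threshold the demand exceeds.
import Mathlib
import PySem

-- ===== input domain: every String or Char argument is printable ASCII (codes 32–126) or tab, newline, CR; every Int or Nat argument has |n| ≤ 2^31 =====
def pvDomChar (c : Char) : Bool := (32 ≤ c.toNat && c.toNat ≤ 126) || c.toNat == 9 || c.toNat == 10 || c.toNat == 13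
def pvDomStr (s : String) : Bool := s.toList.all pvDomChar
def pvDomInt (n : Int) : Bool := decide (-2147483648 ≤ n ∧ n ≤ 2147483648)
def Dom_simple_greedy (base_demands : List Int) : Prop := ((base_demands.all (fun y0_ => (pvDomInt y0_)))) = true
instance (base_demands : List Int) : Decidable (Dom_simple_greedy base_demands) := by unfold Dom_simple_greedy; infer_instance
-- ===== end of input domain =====

-- B replaces A's if/elif chain selecting one of four constants with an additive
-- model: base price 8 plus the sum of surcharges of thresholds exceeded (alternative).

-- ===== PORT A =====
-- literal port: loop appending to `prices`, branches in A's order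
def simple_greedy (base_demands : List Int) : List Int :=
  base_demands.foldl
    (fun prices demand =>
      prices ++ [if demand > 70 then (20 : Int)
                 else if demand > 50 then 15
                 else if demand > 30 then 12
                 else 8])
    []

-- ===== PORT B =====
def pvSurcharges : List (Int × Int) := [(30, 4), (50, 3), (70, 5)]

-- sum of increments of thresholds the demand exceeds (Source B's generator sum)
def pvSurchargeSum (d : Int) : Int :=
  pvSurcharges.foldl (fun s p => if d > p.1 then s + p.2 else s) 0

def simple_greedy_alt (base_demands : List Int) : List Int :=
  base_demands.map (fun d => 8 + pvSurchargeSum d)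

-- ===== PRECONDITION & SPEC =====
def Spec_simple_greedy (base_demands : List Int) (out : List Int) : Prop := out = simple_greedy_alt base_demands
instance (base_demands : List Int) (out : List Int) : Decidable (Spec_simple_greedy base_demands out) := by unfold Spec_simple_greedy; infer_instance

-- ===== CLAIM (what is proved, stated in full; the proofs are below) =====
def Claim_equal_simple_greedy : Prop := ∀ (base_demands : List Int), Dom_simple_greedy base_demands → Spec_simple_greedy base_demands (simple_greedy base_demands)

-- ===== LEMMAS AND PROOFS =====

-- pointwise: A's branch chain equals base 8 plus B's surcharge sum
theorem pv_point (d : Int) :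
    (if d > 70 then (20 : Int) else if d > 50 then 15 else if d > 30 then 12 else 8)
      = 8 + pvSurchargeSum d := by
  unfold pvSurchargeSum pvSurcharges
  by_cases h70 : d > 70 <;> by_cases h50 : d > 50 <;> by_cases h30 : d > 30 <;>
    first
      | omega
      | simp [List.foldl, h70, h50, h30]

-- A's append-foldl is a map
theorem pv_foldl (xs : List Int) (acc : List Int) :
    xs.foldl (fun prices demand =>
      prices ++ [if demand > 70 then (20 : Int)
                 else if demand > 50 then 15
                 else if demand > 30 then 12
                 else 8]) acc
      = acc ++ xs.map (fun d => 8 + pvSurchargeSum d) := by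
  induction xs generalizing acc with
  | nil => simp
  | cons x xs ih =>
      rw [List.foldl_cons, ih, pv_point]
      simp

-- ===== VERDICT (by name: the statement is the Claim_ definition above) =====
theorem simple_greedy_spec : Claim_equal_simple_greedy := by
  intro xs _
  unfold Spec_simple_greedy simple_greedy simple_greedy_alt
  simpa using pv_foldl xs []
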